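-- pv_equiv track=rewrite | github.com/mazumder-lab/SNOWS | CNN_pruning/prune/helpers.py | get_block_number_for_param
-- ===== SOURCE A (Python) =====
-- def get_block_number_for_param(layerparams, param):
--     # Initialize variables
--     current_block = None
--     block_counter = 0
--
--     for i, layer_param in enumerate(layerparams):
--         # Split the parameter string by dots
--         parts = layer_param.split('.')
--         # Extract the block identifier (e.g., 'layer1.0')
--         block_identifier = '.'.join(parts[:2])
--
--         # Increment block_counter when encountering a new block
--         if block_identifier != current_block:
--             block_counter += 1
--             current_block = block_identifier
--
--         # Check if the current layer_param matches the input param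
--         if layer_param == param:
--             return block_counter
--
--     # Return None if the param is not found in layerparams
--     return None
-- ===== SOURCE B (Python) =====
-- def get_block_number_for_param(layerparams, param):
--     # Locate the first match, then count distinct consecutive block
--     # identifiers in the prefix up to and including it.
--     try:
--         idx = layerparams.index(param)
--     except ValueError:
--         return None
--     ids = ['.'.join(p.split('.')[:2]) for p in layerparams[:idx + 1]]
--     return 1 + sum(1 for a, b in zip(ids, ids[1:]) if a != b)
-- ===== Notes on version B (the rewrite author's own statement) =====
-- stated objective: faster
-- what changed: B replaces A's stateful Python-level scan (current block + counter with early return) by index-then-count: locate the first occurrence with list.index (a C-level scan), map only the prefix to block identifiers, and return 1 plus the number of adjacent transitions.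
import Mathlib
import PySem

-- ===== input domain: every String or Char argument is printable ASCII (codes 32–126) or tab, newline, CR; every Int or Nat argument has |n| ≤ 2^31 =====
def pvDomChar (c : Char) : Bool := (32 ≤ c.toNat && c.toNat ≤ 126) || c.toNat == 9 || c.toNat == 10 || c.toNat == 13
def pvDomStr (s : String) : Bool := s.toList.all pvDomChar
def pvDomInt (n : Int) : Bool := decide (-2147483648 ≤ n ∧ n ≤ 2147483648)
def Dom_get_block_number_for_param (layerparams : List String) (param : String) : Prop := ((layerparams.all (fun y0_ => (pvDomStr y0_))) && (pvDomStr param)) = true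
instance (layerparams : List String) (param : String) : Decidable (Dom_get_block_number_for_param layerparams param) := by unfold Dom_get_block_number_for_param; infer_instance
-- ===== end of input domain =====

-- B replaces A's stateful scan by index-then-count-transitions; objective: alternative decomposition (same value, proven equal).

-- '.'.join(layer_param.split('.')[:2]) — shared by both Pythons verbatim.
-- '.split(".")' never raises for the nonempty literal separator, so getD [] is never the default.
def pvBlockId (s : String) : String :=
  PySem.Str.join "." (PySem.List.slice ((PySem.Str.split? s ".").getD []) none (some 2))

-- ===== PORT A =====
-- the for-loop with early return, state = (current_block, block_counter)
def pvLoopA (param : String) : List String → Option String → Int → Option Int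
  | [], _, _ => none
  | layer_param :: rest, current_block, block_counter =>
    let block_identifier := pvBlockId layer_param
    let (block_counter, current_block) :=
      if some block_identifier ≠ current_block then (block_counter + 1, some block_identifier)
      else (block_counter, current_block)
    if layer_param == param then some block_counter
    else pvLoopA param rest current_block block_counter

def get_block_number_for_param (layerparams : List String) (param : String) : Option Int :=
  pvLoopA param layerparams none 0

-- ===== PORT B =====
def get_block_number_for_param_alt (layerparams : List String) (param : String) : Option Int :=
  match PySem.List.index? layerparams param with
  | none => none
  | some idx =>
    let ids := (PySem.List.slice layerparams none (some ((idx : Int) + 1))).map pvBlockId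
    -- sum(1 for a, b in zip(ids, ids[1:]) if a != b) ported as countP over the zip
    some (1 + ((ids.zip ids.tail).countP (fun p => p.1 ≠ p.2) : Int))

-- ===== PRECONDITION & SPEC =====
def Spec_get_block_number_for_param (layerparams : List String) (param : String) (out : Option Int) : Prop := out = get_block_number_for_param_alt layerparams param
instance (layerparams : List String) (param : String) (out : Option Int) : Decidable (Spec_get_block_number_for_param layerparams param out) := by unfold Spec_get_block_number_for_param; infer_instance

-- ===== CLAIM (what is proved, stated in full; the proofs are below) =====
def Claim_equal_get_block_number_for_param : Prop := ∀ (layerparams : List String) (param : String), Dom_get_block_number_for_param layerparams param → Spec_get_block_number_for_param layerparams param (get_block_number_for_param layerparams param)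

-- ===== LEMMAS AND PROOFS =====

-- transition count of a list of ids, seeded with the previous block (none at the start)
def pvCT (cur : Option String) : List String → Int
  | [] => 0
  | i :: rest => (if some i ≠ cur then 1 else 0) + pvCT (some i) rest

lemma pvCT_zip (a : String) (l : List String) :
    pvCT (some a) l = (((a :: l).zip l).countP (fun p => p.1 ≠ p.2) : Int) := by
  induction l generalizing a with
  | nil => simp [pvCT]
  | cons b l ih =>
    simp only [pvCT, List.zip_cons_cons, List.countP_cons, ih b]
    by_cases h : b = a <;> simp [h, eq_comm, add_comm]

lemma pvLoopA_eq (param : String) (xs : List String) :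
    ∀ (cur : Option String) (c : Int),
      pvLoopA param xs cur c =
        match PySem.List.index? xs param with
        | none => none
        | some idx => some (c + pvCT cur ((xs.take (idx + 1)).map pvBlockId)) := by
  induction xs with
  | nil => intro cur c; simp [pvLoopA, PySem.List.index?]
  | cons x rest ih =>
    intro cur c
    by_cases hx : x = param
    · subst hx
      rw [PySem.List.index?_cons_self]
      simp only [pvLoopA, beq_self_eq_true, if_true]
      simp only [List.take, List.map, pvCT]
      by_cases h : some (pvBlockId x) = cur <;> simp [h]
    · rw [PySem.List.index?_cons_of_ne rest hx]
      simp only [pvLoopA, beq_iff_eq, hx, if_false]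
      by_cases h : some (pvBlockId x) = cur
      · simp only [h, ne_eq, not_true_eq_false, if_false, ih]
        cases hidx : PySem.List.index? rest param with
        | none => simp
        | some idx =>
          simp only [List.take_succ_cons, List.map_cons, pvCT, ← h]
          simp
      · simp only [ne_eq, h, not_false_eq_true, if_true, ih]
        cases hidx : PySem.List.index? rest param with
        | none => simp
        | some idx =>
          simp only [List.take_succ_cons, List.map_cons, pvCT, Ne, h, not_false_eq_true, if_true]
          simp; ring

lemma pvTake_slice (xs : List String) (idx : Nat) :
    PySem.List.slice xs none (some ((idx : Int) + 1)) = xs.take (idx + 1) := by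
  have : ((idx : Int) + 1) = ((idx + 1 : Nat) : Int) := by push_cast; ring
  rw [this, PySem.List.slice_to_natCast]

-- ===== VERDICT (by name: the statement is the Claim_ definition above) =====
theorem get_block_number_for_param_spec : Claim_equal_get_block_number_for_param := by
  intro layerparams param _
  unfold Spec_get_block_number_for_param get_block_number_for_param get_block_number_for_param_alt
  rw [pvLoopA_eq]
  cases hidx : PySem.List.index? layerparams param with
  | none => simp
  | some idx =>
    simp only [pvTake_slice]
    obtain ⟨hk, hx, -⟩ := PySem.List.getElem_of_index?_eq_some hidx
    have htake : ∃ y ys, layerparams.take (idx + 1) = y :: ys := by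
      have hnil : layerparams ≠ [] := by
        intro h; rw [h] at hk; simp at hk
      have : layerparams.take (idx + 1) ≠ [] := by
        simp [List.take_eq_nil_iff, hnil]
      cases h : layerparams.take (idx + 1) with
      | nil => exact absurd h this
      | cons y ys => exact ⟨y, ys, rfl⟩
    obtain ⟨y, ys, hys⟩ := htake
    rw [hys]
    simp only [List.map_cons, pvCT, Option.some_ne_none, ne_eq, not_false_eq_true, if_true,
      List.tail_cons, zero_add]
    rw [pvCT_zip]
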